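-- pv_equiv track=rewrite | github.com/hyuntae99/Algorithm | Python3/프로그래머스/1/64061. 크레인 인형뽑기 게임/크레인 인형뽑기 게임.py | solution
-- ===== SOURCE A (Python) =====
-- def solution(board, moves):
--     answer = 0
--     height = {} # 위치에 대한 높이
--     visited = [False for _ in range(len(board))]
--
--     for i in range(len(board)):
--         for j in range(len(board[i])):
--             if visited[j]:
--                 continue
--             if board[i][j] != 0:
--                 height[j + 1] = len(board) - i
--                 visited[j] = True
--
--     result = []
--     for move in moves:
--         # 인형이 없는 경우
--         if height[move] == 0:
--             continue
--         # 인형을 바구니에 추가하고 제거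
--         result.append(board[len(board) - height[move]][move - 1])
--         height[move] -= 1
--
--         # 인형이 두개이상 쌓였을 때
--         if len(result) > 1:
--             # 끝에 있는 두개가 동일하면
--             if result[-1] == result[-2]:
--                 # 인형이 터지니까 +2
--                 result.pop(-1)
--                 result.pop(-1)
--                 answer += 2
--
--     return answer
-- ===== SOURCE B (Python) =====
-- def solution(board, moves):
--     # Build one explicit stack per column (keyed by column index + 1): slice the column
--     # from its topmost non-zero cell down, reading a missing cell of a short row as 0
--     # (an empty slot); columns that are entirely zero get no entry.  Then replay the
--     # moves popping from those stacks into a basket, matching adjacent equal pairs.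
--     stacks = {}
--     for j in range(max(map(len, board), default=0)):
--         col = [row[j] if j < len(row) else 0 for row in board]
--         k = 0
--         while k < len(col) and col[k] == 0:
--             k += 1
--         if k < len(col):
--             stacks[j + 1] = col[k:][::-1]  # top of the column at the end
--     answer = 0
--     basket = []
--     for m in moves:
--         st = stacks[m]
--         if not st:
--             continue
--         doll = st.pop()
--         if basket and basket[-1] == doll:
--             basket.pop()
--             answer += 2
--         else:
--             basket.append(doll)
--     return answer
-- ===== Notes on version B (the rewrite author's own statement) =====
-- stated objective: idiomatic
-- what changed: Replaces A's height-counter dict plus direct board indexing (board[len(board)-height[move]]) with real per-column stacks built once by slicing each column from its topmost non-zero cell (a missing cell of a short row read as 0, an empty slot), popped during the move replay; the basket check-before-push replaces A's append-then-compare-last-two.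
import Mathlib
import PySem

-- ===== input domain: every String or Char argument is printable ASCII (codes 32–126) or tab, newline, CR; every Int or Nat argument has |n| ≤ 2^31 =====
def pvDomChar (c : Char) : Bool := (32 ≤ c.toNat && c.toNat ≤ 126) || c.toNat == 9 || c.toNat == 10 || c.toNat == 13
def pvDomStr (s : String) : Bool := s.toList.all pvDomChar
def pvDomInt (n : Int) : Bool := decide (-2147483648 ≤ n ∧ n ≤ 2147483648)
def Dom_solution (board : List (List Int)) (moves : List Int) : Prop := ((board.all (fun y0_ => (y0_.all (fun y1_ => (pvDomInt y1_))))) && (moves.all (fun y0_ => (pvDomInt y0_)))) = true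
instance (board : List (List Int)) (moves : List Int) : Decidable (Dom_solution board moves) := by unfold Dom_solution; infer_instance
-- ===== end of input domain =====

-- B replaces A's height-counter dict + direct board indexing with real per-column stacks
-- built once and popped during the move replay (objective: idiomatic; same cost).
-- Equivalence is about the RETURN value; neither program mutates its arguments.

-- ===== PORT A =====
-- A-side helpers: the two loop bodies of A, named so the invariant lemmas can speak about them.
-- board[...] indexing uses getD, exact on Pre_ (all indices are in range there).
def aCell (board : List (List Int)) (n i : Nat) (st : PySem.Dict Int Int × List Bool) (j : Nat) :
    PySem.Dict Int Int × List Bool :=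
  if st.2.getD j false then st                             -- if visited[j]: continue
  else if (board.getD i []).getD j 0 ≠ 0 then              -- if board[i][j] != 0
    (st.1.insert ((j : Int) + 1) ((n : Int) - (i : Int)), st.2.set j true)
  else st

def aMove (board : List (List Int)) (n : Nat) (st : Int × PySem.Dict Int Int × List Int) (move : Int) :
    Int × PySem.Dict Int Int × List Int :=
  let h := st.2.1.getD move 0                              -- height[move]; KeyError excluded by Pre_
  if h = 0 then st
  else
    let doll := (board.getD ((n : Int) - h).toNat []).getD (move - 1).toNat 0
    let result := st.2.2 ++ [doll]
    let height := st.2.1.insert move (h - 1)               -- height[move] -= 1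
    if result.length > 1 ∧ PySem.List.pyGetD result (-1) 0 = PySem.List.pyGetD result (-2) 0 then
      (st.1 + 2, height, result.dropLast.dropLast)         -- result.pop(-1); result.pop(-1); answer += 2
    else (st.1, height, result)

def solution (board : List (List Int)) (moves : List Int) : Int :=
  let n := board.length
  let p1 := ((List.range n).foldl (fun st i =>
      (List.range (board.getD i []).length).foldl (aCell board n i) st)
    (PySem.Dict.empty, List.replicate n false)).1
  (moves.foldl (aMove board n) (0, p1, [])).1

-- ===== PORT B =====
-- B-side helpers: B's while loop advancing k past leading zeros, and its two loop bodies.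
def dropZeros (col : List Int) (k : Nat) : Nat :=
  if _h : k < col.length then
    if col.getD k 0 = 0 then dropZeros col (k + 1) else k
  else k
termination_by col.length - k

def bCol (board : List (List Int)) (d : PySem.Dict Int (List Int)) (j : Nat) :
  PySem.Dict Int (List Int) :=
  let col := board.map (fun row => row.getD j 0)           -- [row[j] if j < len(row) else 0 for row in board] IS getD
  let k := dropZeros col 0
  if k < col.length then d.insert ((j : Int) + 1) ((col.drop k).reverse) else d

def bMove (st : Int × PySem.Dict Int (List Int) × List Int) (m : Int) :
    Int × PySem.Dict Int (List Int) × List Int :=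
  let s := st.2.1.getD m []                                -- stacks[m]; KeyError excluded by Pre_
  if s.isEmpty then st
  else
    let doll := PySem.List.pyGetD s (-1) 0                 -- st.pop()
    let stks2 := st.2.1.insert m s.dropLast
    if st.2.2 ≠ [] ∧ PySem.List.pyGetD st.2.2 (-1) 0 = doll then
      (st.1 + 2, stks2, st.2.2.dropLast)
    else (st.1, stks2, st.2.2 ++ [doll])

def solution_alt (board : List (List Int)) (moves : List Int) : Int :=
  let maxw := board.foldl (fun acc r => max acc r.length) 0  -- max(map(len, board), default=0)
  let stks := (List.range maxw).foldl (bCol board) PySem.Dict.empty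
  (moves.foldl bMove (0, stks, [])).1

-- ===== PRECONDITION & SPEC =====
-- Pre_ is exactly where the Python A returns: no row longer than the row count (else A's
-- row-count-sized `visited` raises IndexError), every move names a column holding a
-- non-zero cell (else A's height[move] raises KeyError), and each of the rows a move can
-- pop — the first min(count of the move, rows below the top doll) rows from the column's
-- top doll down — reaches that column (else A's board[...][move-1] raises IndexError).
def Pre_solution (board : List (List Int)) (moves : List Int) : Prop :=
  (∀ r ∈ board, r.length ≤ board.length) ∧
  (∀ m ∈ moves, 1 ≤ m ∧ (∃ r ∈ board, r.getD (m - 1).toNat 0 ≠ 0) ∧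
     (∀ i < board.length,
        board.findIdx (fun r => r.getD (m - 1).toNat 0 != 0) ≤ i →
        i < board.findIdx (fun r => r.getD (m - 1).toNat 0 != 0) +
            min (moves.count m)
              (board.length - board.findIdx (fun r => r.getD (m - 1).toNat 0 != 0)) →
        (m - 1).toNat < (board.getD i []).length))
instance (board : List (List Int)) (moves : List Int) : Decidable (Pre_solution board moves) := by
  unfold Pre_solution; infer_instance

def pvWitness_solution : List (List Int) × List Int := ([[0, 1], [2, 3]], [1, 2, 1])

def Spec_solution (board : List (List Int)) (moves : List Int) (out : Int) : Prop := out = solution_alt board moves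
instance (board : List (List Int)) (moves : List Int) (out : Int) : Decidable (Spec_solution board moves out) := by unfold Spec_solution; infer_instance

-- ===== CLAIM (what is proved, stated in full; the proofs are below) =====
def Claim_equal_solution : Prop := ∀ (board : List (List Int)) (moves : List Int), Dom_solution board moves → Pre_solution board moves → Spec_solution board moves (solution board moves)

-- ===== LEMMAS AND PROOFS =====

-- the j-th column read with default 0 (equal to the real column on rectangular boards)
def colF (board : List (List Int)) (j : Nat) : List Int := board.map (fun r => r.getD j 0)

-- index of the topmost non-zero cell of column j (= board.length when the column is all zero)
def fnzF (board : List (List Int)) (j : Nat) : Nat := dropZeros (colF board j) 0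

theorem dz_le_len (col : List Int) (k : Nat) (h : k ≤ col.length) : dropZeros col k ≤ col.length := by
  fun_induction dropZeros col k with
  | case1 k h2 hz ih => exact ih (by omega)
  | case2 k h2 hz => omega
  | case3 k h2 => omega

theorem dz_nonzero (col : List Int) (k : Nat) (h : dropZeros col k < col.length) :
    col.getD (dropZeros col k) 0 ≠ 0 := by
  fun_induction dropZeros col k with
  | case1 k h2 hz ih => exact ih h
  | case2 k h2 hz => exact hz
  | case3 k h2 => omega

theorem dz_min (col : List Int) (k i : Nat) (hki : k ≤ i) (hnz : col.getD i 0 ≠ 0) :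
    dropZeros col k ≤ i := by
  fun_induction dropZeros col k with
  | case1 k h2 hz ih =>
      rcases Nat.eq_or_lt_of_le hki with rfl | hlt
      · exact absurd hz hnz
      · exact ih hlt
  | case2 k h2 hz => exact hki
  | case3 k h2 => exact hki

theorem colF_length (board : List (List Int)) (j : Nat) : (colF board j).length = board.length := by
  simp [colF]

theorem colF_getD (board : List (List Int)) (j i : Nat) (hi : i < board.length) :
    (colF board j).getD i 0 = (board.getD i []).getD j 0 := by
  rw [colF, List.getD_eq_getElem _ _ (by simpa using hi), List.getD_eq_getElem _ _ hi]
  simp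

theorem fnz_le (board : List (List Int)) (j : Nat) : fnzF board j ≤ board.length := by
  have := dz_le_len (colF board j) 0 (by omega)
  simpa [fnzF, colF_length] using this

theorem fnz_of_wide (board : List (List Int))
    (j : Nat) (hj : ∀ r ∈ board, r.length ≤ j) : fnzF board j = board.length := by
  have hle := fnz_le board j
  rcases Nat.lt_or_ge (fnzF board j) board.length with hlt | hge
  · exfalso
    have hnz := dz_nonzero (colF board j) 0 (by simpa [colF_length] using hlt)
    apply hnz
    rw [show dropZeros (colF board j) 0 = fnzF board j from rfl, colF_getD board j _ hlt]
    have hmem : board.getD (fnzF board j) [] ∈ board := by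
      rw [List.getD_eq_getElem _ _ hlt]; exact List.getElem_mem hlt
    exact List.getD_eq_default _ _ (hj _ hmem)
  · omega

-- phase-1 invariants: the height dict and the visited list after processing some cells,
-- parametrised by the per-column row bound f
def HInv (board : List (List Int)) (f : Nat → Nat) (d : PySem.Dict Int Int) : Prop :=
  ∀ m : Int, d.get? m =
    if 1 ≤ m ∧ fnzF board (m - 1).toNat < f ((m - 1).toNat)
    then some ((board.length : Int) - (fnzF board (m - 1).toNat : Int)) else none

def VInv (board : List (List Int)) (f : Nat → Nat) (v : List Bool) : Prop :=
  v = (List.range board.length).map (fun j => decide (fnzF board j < f j))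

theorem HInv_congr (board : List (List Int)) (f f' : Nat → Nat) (d : PySem.Dict Int Int)
    (hff : ∀ jn, fnzF board jn < f jn ↔ fnzF board jn < f' jn) (h : HInv board f d) :
    HInv board f' d := by
  intro m
  rw [h m]
  by_cases hc : 1 ≤ m ∧ fnzF board (m - 1).toNat < f ((m - 1).toNat)
  · rw [if_pos hc, if_pos ⟨hc.1, (hff _).1 hc.2⟩]
  · rw [if_neg hc, if_neg (by rw [hff ((m - 1).toNat)] at hc; exact hc)]

theorem VInv_congr (board : List (List Int)) (f f' : Nat → Nat) (v : List Bool)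
    (hff : ∀ jn, fnzF board jn < f jn ↔ fnzF board jn < f' jn) (h : VInv board f v) :
    VInv board f' v := by
  rw [VInv] at h ⊢
  rw [h]
  apply List.map_congr_left
  intro j _
  simp [hff j]

-- the mixed bound inside row i: columns below j are already processed for row i
def fmix (i j jn : Nat) : Nat := if jn < j then i + 1 else i

theorem fmix_self (i j : Nat) : fmix i j j = i := by
  rw [fmix]; simp

theorem fmix_succ_self (i j : Nat) : fmix i (j + 1) j = i + 1 := by
  rw [fmix, if_pos (by omega)]

theorem fmix_ne (i j jn : Nat) (h : jn ≠ j) : fmix i j jn = fmix i (j + 1) jn := by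
  rw [fmix, fmix]
  by_cases h2 : jn < j
  · rw [if_pos h2, if_pos (by omega)]
  · rw [if_neg h2, if_neg (by omega)]

theorem aCell_inv (board : List (List Int))
    (i : Nat) (hi : i < board.length) (j : Nat) (hjn : j < board.length)
    (st : PySem.Dict Int Int × List Bool)
    (hH : HInv board (fmix i j) st.1) (hV : VInv board (fmix i j) st.2) :
    HInv board (fmix i (j + 1)) (aCell board board.length i st j).1 ∧
    VInv board (fmix i (j + 1)) (aCell board board.length i st j).2 := by
  have hvlen : st.2.length = board.length := by rw [hV]; simp
  have hvj : st.2.getD j false = decide (fnzF board j < i) := by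
    rw [hV, List.getD_eq_getElem _ _ (by simpa using hjn)]
    simp [fmix]
  have hcell : (board.getD i []).getD j 0 = (colF board j).getD i 0 :=
    (colF_getD board j i hi).symm
  by_cases hfz : fnzF board j < i
  · -- visited: no change; the bound at column j moves from i to i+1, both above fnz
    have hb : st.2.getD j false = true := by rw [hvj]; simp [hfz]
    have hstep : aCell board board.length i st j = st := by
      rw [aCell, if_pos hb]
    rw [hstep]
    have hff : ∀ jn, fnzF board jn < fmix i j jn ↔ fnzF board jn < fmix i (j + 1) jn := by
      intro jn
      by_cases hjj : jn = j
      · subst hjj; rw [fmix_self, fmix_succ_self]; omega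
      · rw [fmix_ne i j jn hjj]
    exact ⟨HInv_congr board _ _ _ hff hH, VInv_congr board _ _ _ hff hV⟩
  · by_cases hnz0 : (board.getD i []).getD j 0 ≠ 0
    · -- first non-zero cell of column j is this very row: record it
      have hfe : fnzF board j = i := by
        have h1 : fnzF board j ≤ i := dz_min (colF board j) 0 i (Nat.zero_le i) (by rw [← hcell]; exact hnz0)
        omega
      have hb : st.2.getD j false = false := by rw [hvj]; simp [hfz]
      have hstep : aCell board board.length i st j =
          (st.1.insert ((j : Int) + 1) ((board.length : Int) - (i : Int)), st.2.set j true) := by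
        rw [aCell, if_neg (by rw [hb]; simp), if_pos hnz0]
      rw [hstep]
      constructor
      · intro m
        rw [PySem.Dict.get?_insert]
        by_cases hm : m = (j : Int) + 1
        · subst hm
          rw [if_pos rfl, if_pos]
          · have : (((j : Int) + 1) - 1).toNat = j := by omega
            rw [this, hfe]
          · have : (((j : Int) + 1) - 1).toNat = j := by omega
            rw [this, hfe]
            refine ⟨by omega, ?_⟩
            simp [fmix]
        · rw [if_neg hm, hH m]
          by_cases h1m : 1 ≤ m
          · have hne : (m - 1).toNat ≠ j := by omega
            rw [fmix_ne i j _ hne]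
          · rw [if_neg (by tauto), if_neg (by tauto)]
      · rw [VInv]
        apply List.ext_getElem
        · simp [hvlen]
        · intro k hk1 hk2
          rw [List.getElem_set]
          have hkn : k < board.length := by simpa [hvlen] using hk1
          by_cases hkj : k = j
          · subst hkj
            simp [fmix_succ_self, hfe]
          · rw [if_neg (fun h => hkj h.symm),
              ← List.getD_eq_getElem st.2 false (by omega), hV,
              List.getD_eq_getElem _ _ (by simpa using hkn)]
            simp [fmix_ne i j k hkj]
    · -- zero cell: the first non-zero of column j is strictly below row i
      rw [not_ne_iff] at hnz0
      have hfne : fnzF board j ≠ i := by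
        intro he
        have := dz_nonzero (colF board j) 0
          (by rw [colF_length]; exact (show fnzF board j < board.length by omega))
        rw [show dropZeros (colF board j) 0 = fnzF board j from rfl, he, ← hcell] at this
        exact this hnz0
      have hb : st.2.getD j false = false := by rw [hvj]; simp [hfz]
      have hstep : aCell board board.length i st j = st := by
        rw [aCell, if_neg (by rw [hb]; simp), if_neg (not_not_intro hnz0)]
      rw [hstep]
      have hff : ∀ jn, fnzF board jn < fmix i j jn ↔ fnzF board jn < fmix i (j + 1) jn := by
        intro jn
        by_cases hjj : jn = j
        · subst hjj; rw [fmix_self, fmix_succ_self]; omega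
        · rw [fmix_ne i j jn hjj]
      exact ⟨HInv_congr board _ _ _ hff hH, VInv_congr board _ _ _ hff hV⟩

theorem aRow_inv (board : List (List Int))
    (hrows : ∀ r ∈ board, r.length ≤ board.length)
    (i : Nat) (hi : i < board.length) (jm : Nat) (hj : jm ≤ (board.getD i []).length)
    (st : PySem.Dict Int Int × List Bool)
    (hH : HInv board (fun _ => i) st.1) (hV : VInv board (fun _ => i) st.2) :
    HInv board (fmix i jm) ((List.range jm).foldl (aCell board board.length i) st).1 ∧
    VInv board (fmix i jm) ((List.range jm).foldl (aCell board board.length i) st).2 := by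
  induction jm with
  | zero =>
      simp only [List.range_zero, List.foldl_nil]
      have hff : ∀ jn, fnzF board jn < i ↔ fnzF board jn < fmix i 0 jn := by
        intro jn
        rw [show fmix i 0 jn = i from by rw [fmix, if_neg (Nat.not_lt_zero jn)]]
      exact ⟨HInv_congr board _ _ _ hff hH, VInv_congr board _ _ _ hff hV⟩
  | succ j ih =>
      rw [List.range_succ, List.foldl_append, List.foldl_cons, List.foldl_nil]
      obtain ⟨h1, h2⟩ := ih (by omega)
      have hrl : (board.getD i []).length ≤ board.length := by
        apply hrows
        rw [List.getD_eq_getElem _ _ hi]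
        exact List.getElem_mem hi
      exact aCell_inv board i hi j (by omega) _ h1 h2

theorem phase1A (board : List (List Int))
    (hrows : ∀ r ∈ board, r.length ≤ board.length)
    (im : Nat) (him : im ≤ board.length) :
    HInv board (fun _ => im)
      (((List.range im).foldl (fun st i =>
          (List.range (board.getD i []).length).foldl (aCell board board.length i) st)
        (PySem.Dict.empty, List.replicate board.length false)).1) ∧
    VInv board (fun _ => im)
      (((List.range im).foldl (fun st i =>
          (List.range (board.getD i []).length).foldl (aCell board board.length i) st)
        (PySem.Dict.empty, List.replicate board.length false)).2) := by
  induction im with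
  | zero =>
      constructor
      · intro m
        rw [if_neg (by rintro ⟨h1, h2⟩; simp at h2)]
        exact PySem.Dict.get?_empty m
      · rw [VInv]
        apply List.ext_getElem
        · simp
        · intro k hk1 hk2
          simp
  | succ i ih =>
      rw [List.range_succ, List.foldl_append, List.foldl_cons, List.foldl_nil]
      have hi : i < board.length := by omega
      obtain ⟨h1, h2⟩ := ih (by omega)
      obtain ⟨g1, g2⟩ := aRow_inv board hrows i hi (board.getD i []).length le_rfl _ h1 h2
      have hff : ∀ jn, fnzF board jn < fmix i (board.getD i []).length jn ↔
          fnzF board jn < i + 1 := by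
        intro jn
        by_cases hjw : jn < (board.getD i []).length
        · rw [fmix, if_pos hjw]
        · rw [fmix, if_neg hjw]
          -- row i does not reach column jn, so its first non-zero cell is not in row i
          have hfne : fnzF board jn ≠ i := by
            intro he
            have hnz := dz_nonzero (colF board jn) 0
              (by rw [colF_length]; exact (show fnzF board jn < board.length by omega))
            rw [show dropZeros (colF board jn) 0 = fnzF board jn from rfl, he,
              colF_getD board jn i hi] at hnz
            exact hnz (List.getD_eq_default _ _ (by omega))
          omega
      exact ⟨HInv_congr board _ _ _ hff g1, VInv_congr board _ _ _ hff g2⟩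

-- phase-1 invariant for B's stack dict after the first jm columns
def SInv (board : List (List Int)) (jm : Nat) (d : PySem.Dict Int (List Int)) : Prop :=
  ∀ m : Int, d.get? m =
    if 1 ≤ m ∧ m ≤ (jm : Int) ∧ fnzF board (m - 1).toNat < board.length
    then some (((colF board (m - 1).toNat).drop (fnzF board (m - 1).toNat)).reverse) else none

theorem bCol_eq (board : List (List Int)) (d : PySem.Dict Int (List Int)) (j : Nat) :
    bCol board d j =
      if fnzF board j < board.length
      then d.insert ((j : Int) + 1) (((colF board j).drop (fnzF board j)).reverse) else d := by
  simp only [bCol]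
  rw [show (board.map (fun row => row.getD j 0)) = colF board j from rfl, colF_length]
  rfl

theorem phase1B (board : List (List Int)) (jm : Nat) :
    SInv board jm ((List.range jm).foldl (bCol board) PySem.Dict.empty) := by
  induction jm with
  | zero =>
      intro m
      rw [if_neg (by omega)]
      exact PySem.Dict.get?_empty m
  | succ j ih =>
      rw [List.range_succ, List.foldl_append, List.foldl_cons, List.foldl_nil, bCol_eq]
      intro m
      by_cases hfz : fnzF board j < board.length
      · rw [if_pos hfz, PySem.Dict.get?_insert]
        by_cases hm : m = (j : Int) + 1
        · subst hm
          rw [if_pos rfl, if_pos]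
          · rw [show (((j : Int) + 1) - 1).toNat = j by omega]
          · refine ⟨by omega, by omega, ?_⟩
            rw [show (((j : Int) + 1) - 1).toNat = j by omega]
            exact hfz
        · rw [if_neg hm, ih m]
          by_cases hc : 1 ≤ m ∧ m ≤ (j : Int) ∧ fnzF board (m - 1).toNat < board.length
          · rw [if_pos hc, if_pos ⟨hc.1, by omega, hc.2.2⟩]
          · rw [if_neg hc, if_neg (by
              rintro ⟨h1, h2, h3⟩
              exact hc ⟨h1, by omega, h3⟩)]
      · rw [if_neg hfz, ih m]
        by_cases hc : 1 ≤ m ∧ m ≤ (j : Int) ∧ fnzF board (m - 1).toNat < board.length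
        · rw [if_pos hc, if_pos ⟨hc.1, by omega, hc.2.2⟩]
        · rw [if_neg hc, if_neg (by
            rintro ⟨h1, h2, h3⟩
            refine hc ⟨h1, ?_, h3⟩
            by_contra hgt
            have hmj : m = (j : Int) + 1 := by omega
            rw [hmj, show (((j : Int) + 1) - 1).toNat = j by omega] at h3
            omega)]

theorem le_foldl_max_acc (bs : List (List Int)) (a : Nat) :
    a ≤ bs.foldl (fun acc r => max acc r.length) a := by
  induction bs generalizing a with
  | nil => simp
  | cons c cs ih => exact le_trans (by omega : a ≤ max a c.length) (ih _)

theorem foldl_max_mono (bs : List (List Int)) (a a' : Nat) (h : a ≤ a') :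
    bs.foldl (fun acc r => max acc r.length) a ≤ bs.foldl (fun acc r => max acc r.length) a' := by
  induction bs generalizing a a' with
  | nil => simpa
  | cons c cs ih =>
      rw [List.foldl_cons, List.foldl_cons]
      exact ih _ _ (show max a c.length ≤ max a' c.length by omega)

theorem len_le_maxw (board : List (List Int)) (r : List Int) (hr : r ∈ board) :
    r.length ≤ board.foldl (fun acc r => max acc r.length) 0 := by
  induction board with
  | nil => cases hr
  | cons b bs ih =>
      rw [List.foldl_cons, List.mem_cons] at *
      rcases hr with heq | hr
      · rw [heq]
        exact le_trans (show b.length ≤ max 0 b.length by omega) (le_foldl_max_acc bs _)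
      · exact le_trans (ih hr) (foldl_max_mono bs _ _ (show 0 ≤ max 0 b.length by omega))

-- the simulation relation between A's height dict and B's stack dict
def KInv (board : List (List Int)) (hd : PySem.Dict Int Int) (sd : PySem.Dict Int (List Int)) : Prop :=
  ∀ m : Int, (hd.get? m = none ∧ sd.get? m = none) ∨
    ∃ h : Int, hd.get? m = some h ∧ 0 ≤ h ∧ h ≤ (board.length : Int) ∧
      sd.get? m = some ((colF board (m - 1).toNat).reverse.take h.toNat)

theorem link (board : List (List Int))
    (hd : PySem.Dict Int Int) (sd : PySem.Dict Int (List Int))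
    (hH : HInv board (fun _ => board.length) hd)
    (hS : SInv board (board.foldl (fun acc r => max acc r.length) 0) sd) : KInv board hd sd := by
  intro m
  rw [HInv] at hH
  by_cases hc : 1 ≤ m ∧ fnzF board (m - 1).toNat < board.length
  · right
    refine ⟨(board.length : Int) - (fnzF board (m - 1).toNat : Int), ?_, ?_, ?_, ?_⟩
    · rw [hH m, if_pos hc]
    · have := fnz_le board (m - 1).toNat; omega
    · omega
    · have hmw : m ≤ ((board.foldl (fun acc r => max acc r.length) 0 : Nat) : Int) := by
        by_contra hgt
        rw [fnz_of_wide board (m - 1).toNat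
          (fun r hr => le_trans (len_le_maxw board r hr) (by omega))] at hc
        omega
      rw [hS m, if_pos ⟨hc.1, hmw, hc.2⟩]
      congr 1
      rw [List.reverse_drop, colF_length]
      congr 1
      have := fnz_le board (m - 1).toNat
      omega
  · left
    constructor
    · rw [hH m, if_neg hc]
    · rw [hS m, if_neg (by rintro ⟨h1, h2, h3⟩; exact hc ⟨h1, h3⟩)]

theorem step2 (board : List (List Int)) (m : Int)
    (a : Int) (res : List Int) (hd : PySem.Dict Int Int) (sd : PySem.Dict Int (List Int))
    (hK : KInv board hd sd) :
    (aMove board board.length (a, hd, res) m).1 = (bMove (a, sd, res) m).1 ∧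
    KInv board (aMove board board.length (a, hd, res) m).2.1 (bMove (a, sd, res) m).2.1 ∧
    (aMove board board.length (a, hd, res) m).2.2 = (bMove (a, sd, res) m).2.2 := by
  rcases hK m with ⟨hn1, hn2⟩ | ⟨h, hh, hh0, hhn, hsn⟩
  · have ha : hd.getD m 0 = 0 := by rw [PySem.Dict.getD_eq_get?_getD, hn1]; rfl
    have hb : sd.getD m [] = [] := by rw [PySem.Dict.getD_eq_get?_getD, hn2]; rfl
    have hA : aMove board board.length (a, hd, res) m = (a, hd, res) := by
      simp [aMove, ha]
    have hB : bMove (a, sd, res) m = (a, sd, res) := by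
      simp [bMove, hb]
    rw [hA, hB]
    exact ⟨rfl, hK, rfl⟩
  · have ha : hd.getD m 0 = h := by rw [PySem.Dict.getD_eq_get?_getD, hh]; rfl
    have hb : sd.getD m [] = (colF board (m - 1).toNat).reverse.take h.toNat := by
      rw [PySem.Dict.getD_eq_get?_getD, hsn]; rfl
    by_cases hzero : h = 0
    · have hA : aMove board board.length (a, hd, res) m = (a, hd, res) := by
        simp [aMove, ha, hzero]
      have hB : bMove (a, sd, res) m = (a, sd, res) := by
        simp [bMove, hb, hzero]
      rw [hA, hB]
      exact ⟨rfl, hK, rfl⟩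
    · have hrevlen : (colF board (m - 1).toNat).reverse.length = board.length := by
        simp [colF]
      have hhle : h.toNat ≤ board.length := by omega
      have hslen : ((colF board (m - 1).toNat).reverse.take h.toNat).length = h.toNat := by
        rw [List.length_take, hrevlen]; omega
      have hsne : (colF board (m - 1).toNat).reverse.take h.toNat ≠ [] := by
        intro he; rw [he] at hslen; simp at hslen; omega
      -- the doll popped by B is the doll A reads off the board
      have hdoll : PySem.List.pyGetD ((colF board (m - 1).toNat).reverse.take h.toNat) (-1) 0 =
          (board.getD (((board.length : Int) - h).toNat) []).getD (m - 1).toNat 0 := by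
        rw [PySem.List.pyGetD_neg_one _ 0 hsne, List.getLast_eq_getElem]
        rw [List.getElem_take, List.getElem_reverse]
        have hidx : (colF board (m - 1).toNat).length - 1 -
            (((colF board (m - 1).toNat).reverse.take h.toNat).length - 1) =
            board.length - h.toNat := by
          rw [hslen, colF_length]; omega
        rw [← List.getD_eq_getElem _ 0, hidx,
          colF_getD board _ _ (by omega),
          show ((board.length : Int) - h).toNat = board.length - h.toNat by omega]
      -- B pops the stack; A decrements the height: the relation is preserved
      have hdrop : ((colF board (m - 1).toNat).reverse.take h.toNat).dropLast =
          (colF board (m - 1).toNat).reverse.take (h - 1).toNat := by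
        rw [List.dropLast_eq_take, List.take_take, hslen]
        congr 1; omega
      have hKnew : KInv board (hd.insert m (h - 1))
          (sd.insert m (((colF board (m - 1).toNat).reverse.take h.toNat).dropLast)) := by
        intro m'
        by_cases hm' : m' = m
        · subst hm'
          right
          exact ⟨h - 1, PySem.Dict.get?_insert_self _ _ _, by omega, by omega, by
            rw [PySem.Dict.get?_insert_self _ _ _, hdrop]⟩
        · rcases hK m' with ⟨g1, g2⟩ | ⟨h', g1, g2, g3, g4⟩
          · exact Or.inl ⟨by rw [PySem.Dict.get?_insert_of_ne _ _ hm', g1],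
              by rw [PySem.Dict.get?_insert_of_ne _ _ hm', g2]⟩
          · exact Or.inr ⟨h', by rw [PySem.Dict.get?_insert_of_ne _ _ hm', g1], g2, g3,
              by rw [PySem.Dict.get?_insert_of_ne _ _ hm', g4]⟩
      -- the two basket conditions agree
      set doll := (board.getD (((board.length : Int) - h).toNat) []).getD (m - 1).toNat 0 with hdolldef
      have hcond : ((res ++ [doll]).length > 1 ∧
          PySem.List.pyGetD (res ++ [doll]) (-1) 0 = PySem.List.pyGetD (res ++ [doll]) (-2) 0)
          ↔ (res ≠ [] ∧ PySem.List.pyGetD res (-1) 0 = doll) := by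
        by_cases hres : res = []
        · subst hres; simp
        · have hlr : 0 < res.length := List.length_pos_iff.2 hres
          have e1 : PySem.List.pyGetD (res ++ [doll]) (-1) 0 = doll :=
            PySem.List.pyGetD_neg_one_append_singleton res doll 0
          have e2 : PySem.List.pyGetD (res ++ [doll]) (-2) 0 = PySem.List.pyGetD res (-1) 0 := by
            rw [PySem.List.pyGetD_neg_ofNat _ 2 0 (by omega) (by simp; omega),
              PySem.List.pyGetD_neg_one _ 0 hres, List.getLast_eq_getElem]
            rw [List.getElem_append_left (by simp; omega)]
            congr 1
            simp
          rw [e1, e2]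
          constructor
          · rintro ⟨_, he⟩; exact ⟨hres, he.symm⟩
          · rintro ⟨_, he⟩; exact ⟨by simp; omega, he.symm⟩
      have hA : aMove board board.length (a, hd, res) m =
          (if (res ++ [doll]).length > 1 ∧
              PySem.List.pyGetD (res ++ [doll]) (-1) 0 = PySem.List.pyGetD (res ++ [doll]) (-2) 0
           then (a + 2, hd.insert m (h - 1), (res ++ [doll]).dropLast.dropLast)
           else (a, hd.insert m (h - 1), res ++ [doll])) := by
        simp only [aMove, ha, if_neg hzero, hdolldef]
      have hB : bMove (a, sd, res) m =
          (if res ≠ [] ∧ PySem.List.pyGetD res (-1) 0 = doll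
           then (a + 2, sd.insert m (((colF board (m - 1).toNat).reverse.take h.toNat).dropLast),
                 res.dropLast)
           else (a, sd.insert m (((colF board (m - 1).toNat).reverse.take h.toNat).dropLast),
                 res ++ [doll])) := by
        simp only [bMove, hb, hdoll, hdolldef]
        rw [if_neg (by rw [List.isEmpty_iff]; exact hsne)]
      rw [hA, hB]
      by_cases hc : res ≠ [] ∧ PySem.List.pyGetD res (-1) 0 = doll
      · rw [if_pos (hcond.2 hc), if_pos hc]
        refine ⟨rfl, hKnew, ?_⟩
        rw [List.dropLast_concat]
      · rw [if_neg (fun hx => hc (hcond.1 hx)), if_neg hc]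
        exact ⟨rfl, hKnew, rfl⟩

theorem phase2 (board : List (List Int)) (moves : List Int)
    (a : Int) (res : List Int) (hd : PySem.Dict Int Int) (sd : PySem.Dict Int (List Int))
    (hK : KInv board hd sd) :
    (moves.foldl (aMove board board.length) (a, hd, res)).1 =
      (moves.foldl bMove (a, sd, res)).1 := by
  induction moves generalizing a res hd sd with
  | nil => rfl
  | cons m rest ih =>
      rw [List.foldl_cons, List.foldl_cons]
      obtain ⟨e1, e2, e3⟩ := step2 board m a res hd sd hK
      have hsh : aMove board board.length (a, hd, res) m =
          ((bMove (a, sd, res) m).1, (aMove board board.length (a, hd, res) m).2.1,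
            (bMove (a, sd, res) m).2.2) := by
        rw [← e1, ← e3]
      rw [hsh]
      exact ih _ _ _ _ e2

-- ===== VERDICT (by name: the statement is the Claim_ definition above) =====
theorem solution_spec : Claim_equal_solution := by
  intro board moves _hDom hPre
  obtain ⟨hrows, _hmv⟩ := hPre
  show solution board moves = solution_alt board moves
  rw [solution, solution_alt]
  have hH := (phase1A board hrows board.length le_rfl).1
  have hS := phase1B board (board.foldl (fun acc r => max acc r.length) 0)
  exact phase2 board moves 0 [] _ _ (link board _ _ hH hS)
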